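-- pv_equiv track=rewrite | github.com/micalon1/small_tasks | prog4.py | get_key_to_min
-- ===== SOURCE A (Python) =====
-- def get_key_to_min(d):
--     valid = []
--     for key in d:
--         if d[key] >= 10:
--             valid.append(d[key])
--     low = min(valid)
--     for k in d:
--         if d[k] == low:
--             return k
-- ===== SOURCE B (Python) =====
-- def get_key_to_min(d):
--     return min((k for k in d if d[k] >= 10), key=lambda k: d[k])
-- ===== Notes on version B (the rewrite author's own statement) =====
-- stated objective: idiomatic
-- what changed: Replaces A's three passes (collect valid values, min over the value list, rescan for the matching key) with a single min-with-key reduction over a filtered key generator, relying on min's first-occurrence tie-break.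
-- outside the precondition, e.g. on get_key_to_min({}): A raises ValueError, B raises ValueError
import Mathlib
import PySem

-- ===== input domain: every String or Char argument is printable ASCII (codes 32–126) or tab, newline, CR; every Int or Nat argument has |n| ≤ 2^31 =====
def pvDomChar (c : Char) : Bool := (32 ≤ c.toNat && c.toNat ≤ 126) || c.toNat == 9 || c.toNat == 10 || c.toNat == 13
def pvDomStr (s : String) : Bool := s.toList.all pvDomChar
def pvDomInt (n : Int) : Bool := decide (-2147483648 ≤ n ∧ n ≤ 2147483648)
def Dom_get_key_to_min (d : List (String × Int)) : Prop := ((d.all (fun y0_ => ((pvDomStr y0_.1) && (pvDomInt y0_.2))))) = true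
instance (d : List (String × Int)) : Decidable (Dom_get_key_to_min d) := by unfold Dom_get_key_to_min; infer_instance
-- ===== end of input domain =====

-- B replaces A's three passes (collect valid values, min of that list, rescan for the matching key)
-- by one min-with-key reduction over the filtered keys; same O(n) cost, single pass after the filter.


-- ===== PORT A =====
-- 'd' is the dict's items in insertion order; 'for key in d' iterates the keys, 'd[key]' is the
-- dict lookup (the key always comes from d itself, so getD's default is never taken under Pre_'s Nodup).
def get_key_to_min (d : List (String × Int)) : String :=
  match PySem.List.min?
      (d.foldl (fun acc p => if 10 ≤ (PySem.Dict.mk d).getD p.1 0 then acc ++ [(PySem.Dict.mk d).getD p.1 0] else acc) ([] : List Int))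
      (fun x => x) with
  | none => ""   -- min([]) raises ValueError in Python; excluded by Pre_
  | some low =>
    match d.find? (fun p => (PySem.Dict.mk d).getD p.1 0 == low) with
    | some p => p.1
    | none => ""  -- Python would fall off the loop and return None; unreachable when low comes from d

-- ===== PORT B =====
def get_key_to_min_alt (d : List (String × Int)) : String :=
  match PySem.List.min?
      ((d.map Prod.fst).filter (fun k => decide (10 ≤ (PySem.Dict.mk d).getD k 0)))
      (fun k => (PySem.Dict.mk d).getD k 0) with
  | some k => k
  | none => ""  -- min() of an empty generator raises ValueError in Python; excluded by Pre_

-- ===== PRECONDITION & SPEC =====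
-- Pre_ excludes (a) inputs with no value ≥ 10, where Python's min([]) raises ValueError, and
-- (b) lists with duplicate keys, which do not represent a Python dict (dict construction collapses them).
def Pre_get_key_to_min (d : List (String × Int)) : Prop :=
  (d.map Prod.fst).Nodup ∧ ∃ p ∈ d, 10 ≤ p.2
instance (d : List (String × Int)) : Decidable (Pre_get_key_to_min d) := by unfold Pre_get_key_to_min; infer_instance
def pvWitness_get_key_to_min : (List (String × Int)) := [("a", 7), ("b", 12), ("c", 15)]

def Spec_get_key_to_min (d : List (String × Int)) (out : String) : Prop := out = get_key_to_min_alt d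
instance (d : List (String × Int)) (out : String) : Decidable (Spec_get_key_to_min d out) := by unfold Spec_get_key_to_min; infer_instance

-- ===== CLAIM (what is proved, stated in full; the proofs are below) =====
def Claim_equal_get_key_to_min : Prop := ∀ (d : List (String × Int)), Dom_get_key_to_min d → Pre_get_key_to_min d → Spec_get_key_to_min d (get_key_to_min d)

-- ===== LEMMAS AND PROOFS =====

-- the min?-fold step, abbreviated for the lemmas below
def pvStep {α : Type} (key : α → Int) (acc : Option α) (x : α) : Option α :=
  match acc with
  | none => some x
  | some m => if key x < key m then some x else some m

theorem min?_eq_foldl {α : Type} (key : α → Int) (xs : List α) :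
    PySem.List.min? xs key = xs.foldl (pvStep key) none := rfl

-- the min?-fold over a mapped list is the fold with the composed key
theorem foldl_pvStep_map {α β : Type} (f : α → β) (g : β → Int) :
    ∀ (xs : List α) (acc : Option α),
      (xs.map f).foldl (pvStep g) (acc.map f) = (xs.foldl (pvStep (g ∘ f)) acc).map f := by
  intro xs
  induction xs with
  | nil => intro acc; rfl
  | cons x t ih =>
    intro acc
    simp only [List.map_cons, List.foldl_cons]
    have hstep : pvStep g (acc.map f) (f x) = (pvStep (g ∘ f) acc x).map f := by
      cases acc with
      | none => rfl
      | some m =>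
        simp only [pvStep, Option.map_some, Function.comp]
        split <;> simp
    rw [hstep, ih]

theorem min?_map {α β : Type} (f : α → β) (g : β → Int) (xs : List α) :
    PySem.List.min? (xs.map f) g = (PySem.List.min? xs (g ∘ f)).map f := by
  rw [min?_eq_foldl, min?_eq_foldl]
  simpa using foldl_pvStep_map f g xs none

-- firstness: the min?-fold from 'some a' yields the first element attaining the minimum key
theorem minFoldH {α : Type} (key : α → Int) :
    ∀ (xs : List α) (a : α),
      ∃ m, xs.foldl (pvStep key) (some a) = some m ∧ key m ≤ key a ∧ (∀ y ∈ xs, key m ≤ key y) ∧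
        (m = a ∨ (key m < key a ∧ xs.find? (fun x => key x == key m) = some m)) := by
  intro xs
  induction xs with
  | nil => intro a; exact ⟨a, rfl, le_refl _, by simp, Or.inl rfl⟩
  | cons x t ih =>
    intro a
    simp only [List.foldl_cons]
    by_cases h : key x < key a
    · have hstep : pvStep key (some a) x = some x := by simp [pvStep, h]
      rw [hstep]
      obtain ⟨m, hm, hle, hall, hdisj⟩ := ih x
      refine ⟨m, hm, le_of_lt (lt_of_le_of_lt hle h), ?_, ?_⟩
      · intro y hy
        rcases List.mem_cons.mp hy with rfl | hy
        · exact hle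
        · exact hall y hy
      · right
        refine ⟨lt_of_le_of_lt hle h, ?_⟩
        rcases hdisj with rfl | ⟨hlt, hfind⟩
        · simp [List.find?_cons]
        · have hne : (key x == key m) = false := by
            simp only [beq_eq_false_iff_ne, ne_eq]
            omega
          simp only [List.find?_cons, hne]
          exact hfind
    · have hstep : pvStep key (some a) x = some a := by simp [pvStep, h]
      rw [hstep]
      obtain ⟨m, hm, hle, hall, hdisj⟩ := ih a
      have hax : key a ≤ key x := le_of_not_gt h
      refine ⟨m, hm, hle, ?_, ?_⟩
      · intro y hy
        rcases List.mem_cons.mp hy with rfl | hy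
        · exact le_trans hle hax
        · exact hall y hy
      · rcases hdisj with rfl | ⟨hlt, hfind⟩
        · exact Or.inl rfl
        · right
          refine ⟨hlt, ?_⟩
          have hne : (key x == key m) = false := by
            simp only [beq_eq_false_iff_ne, ne_eq]
            omega
          simp only [List.find?_cons, hne]
          exact hfind

-- min? returns the FIRST element attaining the minimal key
theorem min?_find? {α : Type} (key : α → Int) (xs : List α) (m : α)
    (h : PySem.List.min? xs key = some m) :
    xs.find? (fun x => key x == key m) = some m := by
  cases xs with
  | nil => rw [min?_eq_foldl] at h; simp at h
  | cons a t =>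
    rw [min?_eq_foldl] at h
    simp only [List.foldl_cons] at h
    have hstep : pvStep key none a = some a := rfl
    rw [hstep] at h
    obtain ⟨m', hm', hle, hall, hdisj⟩ := minFoldH key t a
    rw [hm'] at h
    have hmm : m' = m := by injection h
    subst hmm
    rcases hdisj with rfl | ⟨hlt, hfind⟩
    · simp [List.find?_cons]
    · have hne : (key a == key m') = false := by
        simp only [beq_eq_false_iff_ne, ne_eq]
        omega
      simp only [List.find?_cons, hne]
      exact hfind

-- a find? whose predicate implies the filter predicate passes through the filter
theorem find?_eq_find?_filter {α : Type} (q r : α → Bool) (himp : ∀ x, q x = true → r x = true) :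
    ∀ (l : List α), l.find? q = (l.filter r).find? q := by
  intro l
  induction l with
  | nil => rfl
  | cons x t ih =>
    by_cases hq : q x = true
    · have hr := himp x hq
      simp [List.find?_cons, List.filter_cons, hq, hr]
    · have hq' : q x = false := by simpa using hq
      by_cases hr : r x = true
      · simp [List.find?_cons, List.filter_cons, hq', hr, ih]
      · have hr' : r x = false := by simpa using hr
        simp [List.find?_cons, List.filter_cons, hq', hr', ih]

-- the 'valid.append' loop collects exactly the filtered, looked-up values
theorem foldl_append_ite_filter {α β : Type} (p : α → Prop) [DecidablePred p] (f : α → β) :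
    ∀ (l : List α) (acc : List β),
      l.foldl (fun acc x => if p x then acc ++ [f x] else acc) acc
        = acc ++ (l.filter (fun x => decide (p x))).map f := by
  intro l
  induction l with
  | nil => intro acc; simp
  | cons x t ih =>
    intro acc
    by_cases h : p x
    · simp [List.filter_cons, h, ih]
    · simp [List.filter_cons, h, ih]

-- the main equivalence, with no hypothesis at all: the two Lean ports agree on every input
theorem ports_agree (d : List (String × Int)) :
    get_key_to_min d = get_key_to_min_alt d := by
  unfold get_key_to_min get_key_to_min_alt
  set L : String → Int := fun k => (PySem.Dict.mk d).getD k 0 with hL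
  set ks : List String := (d.map Prod.fst).filter (fun k => decide (10 ≤ L k)) with hks
  have hvalid : d.foldl (fun acc p => if 10 ≤ (PySem.Dict.mk d).getD p.1 0 then acc ++ [(PySem.Dict.mk d).getD p.1 0] else acc) ([] : List Int)
      = ks.map L := by
    rw [foldl_append_ite_filter (fun p : String × Int => 10 ≤ (PySem.Dict.mk d).getD p.1 0) (fun p => (PySem.Dict.mk d).getD p.1 0)]
    rw [hks, List.filter_map, List.map_map]
    simp only [List.nil_append]
    rfl
  rw [hvalid]
  have hmap : PySem.List.min? (ks.map L) (fun x => x) = (PySem.List.min? ks L).map L := by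
    rw [min?_map L (fun x => x) ks]; rfl
  rw [hmap]
  cases hmin : PySem.List.min? ks L with
  | none => simp
  | some m =>
    simp only [Option.map_some]
    -- 10 ≤ L m, because m survives the filter
    have hmem : m ∈ ks := PySem.List.min?_mem hmin
    have h10 : 10 ≤ L m := by
      rw [hks] at hmem
      have := (List.mem_filter.mp hmem).2
      simpa using this
    -- A's rescan over d finds exactly m
    have hfindks : ks.find? (fun k => L k == L m) = some m := min?_find? L ks m hmin
    have hkeys : (d.map Prod.fst).find? (fun k => L k == L m) = some m := by
      rw [find?_eq_find?_filter (fun k => L k == L m) (fun k => decide (10 ≤ L k))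
        (by intro x hx; have : L x = L m := by simpa using hx
            simp [this, h10])]
      rw [← hks]; exact hfindks
    rw [List.find?_map] at hkeys
    cases hfd : d.find? ((fun k => L k == L m) ∘ Prod.fst) with
    | none => rw [hfd] at hkeys; simp at hkeys
    | some p =>
      rw [hfd] at hkeys
      simp only [Option.map_some, Option.some.injEq] at hkeys
      have hfd' : d.find? (fun p => (PySem.Dict.mk d).getD p.1 0 == L m) = some p := by
        simpa [Function.comp, hL] using hfd
      rw [hfd']
      exact hkeys

-- ===== VERDICT (by name: the statement is the Claim_ definition above) =====
theorem get_key_to_min_spec : Claim_equal_get_key_to_min := by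
  intro d _ _
  unfold Spec_get_key_to_min
  exact ports_agree d
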